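-- pv_equiv track=rewrite | github.com/anastasiyakudzina/Python_for_DQE | module_4_String_Object.py | create_capitalizing_sentences
-- ===== SOURCE A (Python) =====
-- def create_capitalizing_sentences(text):
--     normalize_sentences = []
--     for i in text.split('\n'):
--         find_sentences = [sentence for sentence in i.split('.')]
--         for s in find_sentences:
--             capitalize_sentences = s.capitalize()
--             normalize_sentences.append(capitalize_sentences)
--     return normalize_sentences
-- ===== SOURCE B (Python) =====
-- def create_capitalizing_sentences(text):
--     # One flat left-to-right pass over the characters; no nested splits.
--     out = []
--     cur = []
--     for ch in text:
--         if ch == '.' or ch == '\n':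
--             out.append(''.join(cur).capitalize())
--             cur = []
--         else:
--             cur.append(ch)
--     out.append(''.join(cur).capitalize())
--     return out
-- ===== Notes on version B (the rewrite author's own statement) =====
-- stated objective: alternative
-- what changed: Replaces A's nested split-on-newline then split-on-period passes with a single flat left-to-right scan over the characters that emits a capitalized segment at each delimiter.
import Mathlib
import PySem

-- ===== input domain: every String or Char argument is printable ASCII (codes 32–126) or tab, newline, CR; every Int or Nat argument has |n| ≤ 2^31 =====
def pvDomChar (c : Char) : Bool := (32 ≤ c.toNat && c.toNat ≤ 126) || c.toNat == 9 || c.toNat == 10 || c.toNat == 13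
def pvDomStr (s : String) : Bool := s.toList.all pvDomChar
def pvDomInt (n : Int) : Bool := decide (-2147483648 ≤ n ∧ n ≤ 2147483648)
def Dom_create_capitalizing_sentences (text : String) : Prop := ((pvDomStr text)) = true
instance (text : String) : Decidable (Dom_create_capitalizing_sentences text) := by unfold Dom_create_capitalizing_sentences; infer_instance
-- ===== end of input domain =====

-- B replaces A's nested split-on-newline-then-split-on-period loops by one flat left-to-right
-- pass over the characters (objective: alternative decomposition, same asymptotic cost).


-- s.capitalize() for ASCII: first char uppercased, the rest lowercased (exact on Dom's ASCII range)
def pyCapitalize : List Char → List Char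
  | [] => []
  | c :: t => PySem.Chars.upperChar c :: t.map PySem.Chars.lowerChar

-- ===== PORT A =====
def create_capitalizing_sentences (text : String) : List String :=
  (PySem.Chars.splitOn text.toList ['\n']).foldl
    (fun normalize_sentences i =>
      let find_sentences := (PySem.Chars.splitOn i ['.']).map (fun sentence => sentence)
      find_sentences.foldl
        (fun acc s =>
          let capitalize_sentences := String.ofList (pyCapitalize s)
          acc ++ [capitalize_sentences]) normalize_sentences) []

-- ===== PORT B =====
def create_capitalizing_sentences_alt (text : String) : List String :=
  let st := text.toList.foldl
    (fun (st : List String × List Char) ch =>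
      if ch = '.' ∨ ch = '\n' then (st.1 ++ [String.ofList (pyCapitalize st.2)], [])
      else (st.1, st.2 ++ [ch])) ([], [])
  st.1 ++ [String.ofList (pyCapitalize st.2)]

-- ===== PRECONDITION & SPEC =====
def Spec_create_capitalizing_sentences (text : String) (out : List String) : Prop := out = create_capitalizing_sentences_alt text
instance (text : String) (out : List String) : Decidable (Spec_create_capitalizing_sentences text out) := by unfold Spec_create_capitalizing_sentences; infer_instance

-- ===== CLAIM (what is proved, stated in full; the proofs are below) =====
def Claim_equal_create_capitalizing_sentences : Prop := ∀ (text : String), Dom_create_capitalizing_sentences text → Spec_create_capitalizing_sentences text (create_capitalizing_sentences text)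

-- ===== LEMMAS AND PROOFS =====

lemma go_acc (sep : List Char) (fuel : Nat) (l cur : List Char) (acc : List (List Char)) :
    PySem.Chars.splitOn.go sep fuel l cur acc = acc.reverse ++ PySem.Chars.splitOn.go sep fuel l cur [] := by
  induction fuel generalizing l cur acc with
  | zero => simp [PySem.Chars.splitOn.go]
  | succ n ih =>
    cases l with
    | nil => simp [PySem.Chars.splitOn.go]
    | cons c rest =>
      simp only [PySem.Chars.splitOn.go]
      split
      · rw [ih _ _ (cur.reverse :: acc), ih _ _ [cur.reverse]]; simp
      · exact ih _ _ _

lemma go_ne_nil (sep : List Char) (fuel : Nat) (l cur : List Char) (acc : List (List Char)) :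
    PySem.Chars.splitOn.go sep fuel l cur acc ≠ [] := by
  induction fuel generalizing l cur acc with
  | zero => simp [PySem.Chars.splitOn.go]
  | succ n ih =>
    cases l with
    | nil => simp [PySem.Chars.splitOn.go]
    | cons c rest =>
      simp only [PySem.Chars.splitOn.go]
      split
      · exact ih _ _ _
      · exact ih _ _ _

-- prepend a char to the first segment of a split result
def prependHead (c : Char) : List (List Char) → List (List Char)
  | [] => [[c]]
  | h :: r => (c :: h) :: r

lemma go_cur (sep : List Char) (fuel : Nat) (l cur : List Char) :
    PySem.Chars.splitOn.go sep fuel l cur [] =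
      match PySem.Chars.splitOn.go sep fuel l [] [] with
      | [] => [cur.reverse ++ l]
      | h :: r => (cur.reverse ++ h) :: r := by
  induction fuel generalizing l cur with
  | zero => simp [PySem.Chars.splitOn.go]
  | succ n ih =>
    cases l with
    | nil => simp [PySem.Chars.splitOn.go]
    | cons c rest =>
      simp only [PySem.Chars.splitOn.go]
      split
      · rw [go_acc _ _ _ _ [cur.reverse], go_acc _ _ _ _ [List.reverse []]]
        simp
      · rw [ih rest (c :: cur), ih rest [c]]
        cases PySem.Chars.splitOn.go sep n rest [] [] <;> simp

lemma splitOn_cons (d c : Char) (t : List Char) :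
    PySem.Chars.splitOn (c :: t) [d] =
      if c = d then [] :: PySem.Chars.splitOn t [d]
      else prependHead c (PySem.Chars.splitOn t [d]) := by
  simp only [PySem.Chars.splitOn, List.length_cons, PySem.Chars.splitOn.go]
  by_cases h : d = c
  · subst h
    rw [if_pos (by simp [List.isPrefixOf])]
    simp only [List.reverse_nil, List.length_nil, Nat.zero_add, List.drop_succ_cons,
      List.drop_zero]
    rw [go_acc _ _ _ _ [[]]]
    simp
  · simp only [List.isPrefixOf, Bool.and_true, beq_iff_eq, h, if_false]
    rw [go_cur]
    rw [if_neg (fun hh => h (Eq.symm hh))]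
    cases hgo : PySem.Chars.splitOn.go [d] (t.length + 1) t [] [] with
    | nil => exact absurd hgo (go_ne_nil _ _ _ _ _)
    | cons hh rr => simp [prependHead]

lemma splitOn_nil (d : Char) : PySem.Chars.splitOn ([] : List Char) [d] = [[]] := by
  simp [PySem.Chars.splitOn, PySem.Chars.splitOn.go]

lemma splitOn_ne_nil (d : Char) (l : List Char) : PySem.Chars.splitOn l [d] ≠ [] :=
  go_ne_nil _ _ _ _ _

-- flat split on '.' or '\n' (the proof's common shape of both programs)
def splitAny : List Char → List (List Char)
  | [] => [[]]
  | c :: t => if c = '.' ∨ c = '\n' then [] :: splitAny t else prependHead c (splitAny t)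

lemma splitAny_ne_nil (l : List Char) : splitAny l ≠ [] := by
  cases l with
  | nil => simp [splitAny]
  | cons c t =>
    simp only [splitAny]
    split
    · simp
    · cases splitAny t <;> simp [prependHead]

lemma prependHead_append (c : Char) (X Y : List (List Char)) (hX : X ≠ []) :
    prependHead c X ++ Y = prependHead c (X ++ Y) := by
  cases X with
  | nil => exact absurd rfl hX
  | cons h r => simp [prependHead]

-- A's nested splits flatten to the single flat split
lemma flatMap_split_eq_splitAny (cs : List Char) :
    (PySem.Chars.splitOn cs ['\n']).flatMap (fun i => PySem.Chars.splitOn i ['.']) = splitAny cs := by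
  induction cs with
  | nil => simp [splitOn_nil, splitAny]
  | cons c t ih =>
    by_cases hn : c = '\n'
    · subst hn
      rw [splitOn_cons]
      simp [splitOn_nil, splitAny, ih]
    · rw [splitOn_cons, if_neg hn]
      cases hsp : PySem.Chars.splitOn t ['\n'] with
      | nil => exact absurd hsp (splitOn_ne_nil _ _)
      | cons h r =>
        simp only [prependHead, List.flatMap_cons]
        rw [splitOn_cons]
        by_cases hd : c = '.'
        · simp only [splitAny, hd, true_or, if_true]
          have : PySem.Chars.splitOn h ['.'] ++ r.flatMap (fun i => PySem.Chars.splitOn i ['.'])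
              = splitAny t := by
            have := ih; rw [hsp] at this; simpa [List.flatMap_cons] using this
          simp [← this]
        · simp only [if_neg hd]
          rw [prependHead_append _ _ _ (splitOn_ne_nil _ _)]
          have hflat : PySem.Chars.splitOn h ['.'] ++ r.flatMap (fun i => PySem.Chars.splitOn i ['.'])
              = splitAny t := by
            have := ih; rw [hsp] at this; simpa [List.flatMap_cons] using this
          rw [hflat]
          simp [splitAny, hd, hn]

-- A computes map-capitalize over the flattened nested split
lemma portA_eq (cs : List Char) :
    (PySem.Chars.splitOn cs ['\n']).foldl
      (fun normalize i =>
        ((PySem.Chars.splitOn i ['.']).map (fun sentence => sentence)).foldl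
          (fun acc s => acc ++ [String.ofList (pyCapitalize s)]) normalize) []
    = ((PySem.Chars.splitOn cs ['\n']).flatMap (fun i => PySem.Chars.splitOn i ['.'])).map
        (fun s => String.ofList (pyCapitalize s)) := by
  generalize PySem.Chars.splitOn cs ['\n'] = lines
  induction lines using List.reverseRecOn with
  | nil => simp
  | append_singleton l x ih =>
    simp only [List.foldl_append, List.foldl_cons, List.foldl_nil, ih, List.flatMap_append,
      List.flatMap_cons, List.flatMap_nil, List.append_nil, List.map_append]
    rw [PySem.List.foldl_append_singleton_eq_map]
    simp

-- B's loop from any state computes out ++ map-capitalize of splitAny with cur prefixed to the head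
lemma portB_loop (cs cur : List Char) (out : List String) :
    ((cs.foldl
        (fun (st : List String × List Char) ch =>
          if ch = '.' ∨ ch = '\n' then (st.1 ++ [String.ofList (pyCapitalize st.2)], [])
          else (st.1, st.2 ++ [ch])) (out, cur)).1 ++
      [String.ofList (pyCapitalize (cs.foldl
        (fun (st : List String × List Char) ch =>
          if ch = '.' ∨ ch = '\n' then (st.1 ++ [String.ofList (pyCapitalize st.2)], [])
          else (st.1, st.2 ++ [ch])) (out, cur)).2)])
    = out ++ (match splitAny cs with
        | [] => [cur]
        | h :: r => (cur ++ h) :: r).map (fun s => String.ofList (pyCapitalize s)) := by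
  induction cs generalizing cur out with
  | nil => simp [splitAny]
  | cons c t ih =>
    by_cases hc : c = '.' ∨ c = '\n'
    · simp only [List.foldl_cons, if_pos hc]
      rw [ih]
      cases hsa : splitAny t with
      | nil => exact absurd hsa (splitAny_ne_nil _)
      | cons h r =>
        simp [splitAny, hc, hsa]
    · simp only [List.foldl_cons, if_neg hc]
      rw [ih]
      cases hsa : splitAny t with
      | nil => exact absurd hsa (splitAny_ne_nil _)
      | cons h r =>
        have h1 : ¬ c = '.' := fun h => hc (Or.inl h)
        have h2 : ¬ c = '\n' := fun h => hc (Or.inr h)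
        simp [splitAny, h1, h2, hsa, prependHead]

-- ===== VERDICT (by name: the statement is the Claim_ definition above) =====
theorem create_capitalizing_sentences_spec : Claim_equal_create_capitalizing_sentences := by
  intro text _
  show create_capitalizing_sentences text = create_capitalizing_sentences_alt text
  simp only [create_capitalizing_sentences, create_capitalizing_sentences_alt]
  rw [portA_eq, flatMap_split_eq_splitAny, portB_loop text.toList [] []]
  cases hsa : splitAny text.toList with
  | nil => exact absurd hsa (splitAny_ne_nil _)
  | cons h r => simp
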